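-- pv_equiv track=rewrite | github.com/visakai/TinyURL | app.py | _base16_to_base62
-- ===== SOURCE A (Python) =====
-- def _base16_to_base62(s):
--     # truncate first 11 digits
--     hex= s[:11]
--     # convert base16 to base10
--     dec = int(hex, 16)
--     # convert decimal to base 62
--     alphanum='0123456789ABCDEFGHIJKLMNOPQRSTUVWXYZabcdefghijklmnopqrstuvwxyz'
--     digits=[]
--     while dec >= 62:
--         m=dec%62
--         dec=dec//62
--         digits.append(alphanum[m])
--     digits.append(alphanum[dec])
--     base62=''.join(digits[::-1])
--     if len(base62)<8:
--         base62 = '0'*(8-len(base62)) + base62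
--     return base62
-- ===== SOURCE B (Python) =====
-- def _base16_to_base62(s):
--     # 11 hex digits give dec < 16**11 < 62**8, so exactly 8 base-62 positions suffice:
--     # extract each digit positionally, most-significant first (no reversal, no pad branch).
--     dec = int(s[:11], 16)
--     alphanum = '0123456789ABCDEFGHIJKLMNOPQRSTUVWXYZabcdefghijklmnopqrstuvwxyz'
--     return ''.join(alphanum[(dec // 62 ** (7 - i)) % 62] for i in range(8))
-- ===== Notes on version B (the rewrite author's own statement) =====
-- stated objective: simpler
-- what changed: A collects base-62 digits LSB-first in a while-loop, reverses them and zero-pads to width 8; B extracts the 8 digits positionally MSB-first ((dec // 62**(7-i)) % 62 for i in range(8)), needing no list, no reversal and no padding branch since the 11-hex truncation guarantees dec < 62**8.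
-- outside the precondition, e.g. on _base16_to_base62('-f'): A returns '0000000l', B returns 'zzzzzzzl'
import Mathlib
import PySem

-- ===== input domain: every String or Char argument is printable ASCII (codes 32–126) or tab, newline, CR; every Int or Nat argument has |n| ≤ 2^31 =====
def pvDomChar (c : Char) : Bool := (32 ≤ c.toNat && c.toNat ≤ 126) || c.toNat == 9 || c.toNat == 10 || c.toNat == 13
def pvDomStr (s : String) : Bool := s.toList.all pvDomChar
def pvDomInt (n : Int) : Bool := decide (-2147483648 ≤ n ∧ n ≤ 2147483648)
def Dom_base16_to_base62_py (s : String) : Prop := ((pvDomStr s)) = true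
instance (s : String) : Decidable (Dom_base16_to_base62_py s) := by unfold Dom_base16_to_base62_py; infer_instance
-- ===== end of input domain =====

-- B replaces A's LSB-first divide loop + reversal + zero-padding branch by a direct
-- positional MSB-first extraction of the 8 base-62 digits (dec < 62^8 from the 11-hex truncation).


-- alphanum = '0123456789…z' (shared string literal of both Pythons)
def pvAlphanum : List Char := "0123456789ABCDEFGHIJKLMNOPQRSTUVWXYZabcdefghijklmnopqrstuvwxyz".toList

-- ===== PORT A =====
-- the while-loop: while dec >= 62: m = dec%62; dec = dec//62; digits.append(alphanum[m])
-- (alphanum[m] is exact as pyGetD: 0 ≤ m = dec%62 < 62 = len(alphanum), so Python never raises there)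
def pvALoop (dec : Int) (digits : List Char) : Int × List Char :=
  if h : 62 ≤ dec then
    pvALoop (PySem.Int.floordiv dec 62) (digits ++ [PySem.List.pyGetD pvAlphanum (PySem.Int.mod dec 62) '0'])
  else (dec, digits)
termination_by dec.toNat
decreasing_by
  have h2 : PySem.Int.floordiv dec 62 = dec / 62 := PySem.Int.floordiv_eq_ediv_of_pos (by omega)
  omega

def base16_to_base62_py (s : String) : String :=
  let hex := PySem.List.slice s.toList none (some 11)        -- s[:11]
  match PySem.Int.ofCharsBase? hex 16 with
  | none => ""                                               -- int(hex, 16) raises ValueError: outside Pre_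
  | some dec0 =>
    let (dec, digits) := pvALoop dec0 []
    match PySem.List.pyGet? pvAlphanum dec with              -- digits.append(alphanum[dec])
    | none => ""                                             -- IndexError (dec ≤ -63): outside Pre_
    | some c =>
      let digits := digits ++ [c]
      match PySem.List.slice? digits none none (-1) with     -- digits[::-1]
      | none => ""                                           -- unreachable (step ≠ 0)
      | some base62 =>
        if base62.length < 8 then
          String.mk (List.replicate (8 - base62.length) '0' ++ base62)
        else String.mk base62

-- ===== PORT B =====
def base16_to_base62_py_alt (s : String) : String :=
  match PySem.Int.ofCharsBase? (PySem.List.slice s.toList none (some 11)) 16 with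
  | none => ""                                               -- int(s[:11], 16) raises ValueError: outside Pre_
  | some dec =>
    String.mk ((PySem.List.pyRange 0 8 1).map (fun i =>
      PySem.List.pyGetD pvAlphanum
        (PySem.Int.mod (PySem.Int.floordiv dec ((62:Int) ^ ((7:Int) - i).toNat)) 62) '0'))

-- ===== PRECONDITION & SPEC =====
-- Pre_ restricts to the function's natural domain (an md5 hex digest prefix): s[:11] must parse
-- under int(,16) to a NONNEGATIVE value. It excludes inputs where int() raises (ValueError) and
-- negatively-signed inputs, where A's alphanum[dec] either raises IndexError (dec ≤ -63) or
-- returns a negative-index wraparound character that is an accident of A's implementation.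
-- The bound v < 62^8 is implied by the 11-character truncation (16^11 < 62^8) and excludes no input.
def Pre_base16_to_base62_py (s : String) : Prop :=
  (match PySem.Int.ofCharsBase? (PySem.List.slice s.toList none (some 11)) 16 with
   | some v => decide (0 ≤ v ∧ v < 62 ^ 8)
   | none => false) = true
instance (s : String) : Decidable (Pre_base16_to_base62_py s) := by
  unfold Pre_base16_to_base62_py; infer_instance
def pvWitness_base16_to_base62_py : String := "7f3a"
def Spec_base16_to_base62_py (s : String) (out : String) : Prop := out = base16_to_base62_py_alt s
instance (s : String) (out : String) : Decidable (Spec_base16_to_base62_py s out) := by unfold Spec_base16_to_base62_py; infer_instance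

-- ===== CLAIM (what is proved, stated in full; the proofs are below) =====
def Claim_equal_base16_to_base62_py : Prop := ∀ (s : String), Dom_base16_to_base62_py s → Pre_base16_to_base62_py s → Spec_base16_to_base62_py s (base16_to_base62_py s)

-- ===== LEMMAS AND PROOFS =====

-- LSB-first loop digits (all but the final one) and the final remaining value, over Nat
def pvPref (n : Nat) : List Nat :=
  if n < 62 then [] else n % 62 :: pvPref (n / 62)
def pvFin (n : Nat) : Nat :=
  if n < 62 then n else pvFin (n / 62)

-- MSB-first digit list of fixed width k
def pvMsb : Nat → Nat → List Nat
  | 0, _ => []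
  | (k+1), n => pvMsb k (n / 62) ++ [n % 62]

def pvCh (d : Nat) : Char := pvAlphanum.getD d '0'

theorem pvFin_lt (n : Nat) : pvFin n < 62 := by
  fun_induction pvFin n with
  | case1 n h => omega
  | case2 n h ih => exact ih

theorem pvCh_eq (m : Nat) :
    PySem.List.pyGetD pvAlphanum ((m : Nat) : Int) '0' = pvCh m := by
  rw [PySem.List.pyGetD_natCast]; rfl

theorem pvALoop_spec (n : Nat) (acc : List Char) :
    pvALoop (n : Int) acc = ((pvFin n : Int), acc ++ (pvPref n).map pvCh) := by
  fun_induction pvPref n generalizing acc with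
  | case1 n h =>
    rw [pvALoop, dif_neg (by exact_mod_cast not_le.mpr h), pvFin, if_pos h]
    simp
  | case2 n h ih =>
    rw [pvALoop, dif_pos (by exact_mod_cast Nat.not_lt.mp h)]
    rw [show PySem.Int.floordiv (n:Int) 62 = ((n / 62 : Nat) : Int) from by
          exact_mod_cast PySem.Int.floordiv_natCast n 62]
    rw [ih]
    rw [show PySem.Int.mod (n:Int) 62 = ((n % 62 : Nat) : Int) from by
          exact_mod_cast PySem.Int.mod_natCast n 62]
    rw [pvCh_eq]
    rw [show pvFin n = pvFin (n / 62) from by rw [pvFin, if_neg h]]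
    simp

theorem pvMsb_zero (k : Nat) : pvMsb k 0 = List.replicate k 0 := by
  induction k with
  | zero => rfl
  | succ k ih => simp [pvMsb, ih, List.replicate_succ' (n := k)]

theorem pvMsb_length (k : Nat) : ∀ n, (pvMsb k n).length = k := by
  induction k with
  | zero => intro n; rfl
  | succ k ih => intro n; simp [pvMsb, ih]

theorem pvPad_eq : ∀ (k n : Nat), 1 ≤ k → n < 62 ^ k →
    pvMsb k n = List.replicate (k - ((pvPref n).length + 1)) 0 ++ (pvFin n :: (pvPref n).reverse) := by
  intro k
  induction k with
  | zero => omega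
  | succ k ih =>
    intro n _ hn
    by_cases h : n < 62
    · rw [pvPref, if_pos h, pvFin, if_pos h]
      have h62 : n / 62 = 0 := by omega
      simp [pvMsb, h62, pvMsb_zero, Nat.mod_eq_of_lt h]
    · have hk : 1 ≤ k := by
        by_contra hk0
        have : k = 0 := by omega
        subst this; simp at hn; omega
      have hdiv : n / 62 < 62 ^ k := by
        rw [Nat.div_lt_iff_lt_mul (by omega)]
        calc n < 62 ^ (k+1) := hn
          _ = 62 ^ k * 62 := by ring
      have hihd := ih (n / 62) hk hdiv
      rw [pvPref, if_neg h, pvFin, if_neg h]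
      simp only [pvMsb, hihd, List.length_cons, List.reverse_cons]
      rw [show k + 1 - ((pvPref (n / 62)).length + 1 + 1) = k - ((pvPref (n / 62)).length + 1) by omega]
      simp [List.append_assoc]

theorem pvLen_le (n : Nat) (hn : n < 62 ^ 8) : (pvPref n).length + 1 ≤ 8 := by
  have h := congrArg List.length (pvPad_eq 8 n (by omega) hn)
  rw [pvMsb_length] at h
  simp at h
  omega

-- the padded, reversed loop output is exactly the fixed-width MSB digit list
theorem pvA_digits (n : Nat) (hn : n < 62 ^ 8) :
    List.replicate (8 - ((pvPref n).map pvCh ++ [pvCh (pvFin n)]).reverse.length) '0' ++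
      ((pvPref n).map pvCh ++ [pvCh (pvFin n)]).reverse = (pvMsb 8 n).map pvCh := by
  rw [pvPad_eq 8 n (by omega) hn]
  simp [List.map_reverse, show pvCh 0 = '0' from rfl]

theorem pvMsb_eight (n : Nat) : pvMsb 8 n =
    [n / 62^7 % 62, n / 62^6 % 62, n / 62^5 % 62, n / 62^4 % 62,
     n / 62^3 % 62, n / 62^2 % 62, n / 62 % 62, n % 62] := by
  simp [pvMsb, Nat.div_div_eq_div_mul]

theorem pvB_elem (n k : Nat) :
    PySem.List.pyGetD pvAlphanum (PySem.Int.mod (PySem.Int.floordiv (n:Int) ((62:Int)^k)) 62) '0'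
      = pvCh (n / 62^k % 62) := by
  rw [show (62:Int)^k = ((62^k : Nat) : Int) from by push_cast; ring]
  rw [show PySem.Int.floordiv (n:Int) ((62^k:Nat):Int) = ((n / 62^k : Nat):Int) from by
        exact_mod_cast PySem.Int.floordiv_natCast n (62^k)]
  rw [show PySem.Int.mod ((n / 62^k : Nat):Int) 62 = ((n / 62^k % 62 : Nat):Int) from by
        exact_mod_cast PySem.Int.mod_natCast (n / 62^k) 62]
  rw [pvCh_eq]

-- ===== VERDICT (by name: the statement is the Claim_ definition above) =====
theorem base16_to_base62_py_spec : Claim_equal_base16_to_base62_py := by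
  intro s _ hpre
  unfold Pre_base16_to_base62_py at hpre
  unfold Spec_base16_to_base62_py base16_to_base62_py base16_to_base62_py_alt
  cases hx : PySem.Int.ofCharsBase? (PySem.List.slice s.toList none (some 11)) 16 with
  | none => rw [hx] at hpre; simp at hpre
  | some v =>
    rw [hx] at hpre
    simp only [decide_eq_true_eq] at hpre
    obtain ⟨hv0, hv8⟩ := hpre
    obtain ⟨n, rfl⟩ : ∃ m : Nat, v = (m : Int) := ⟨v.toNat, (Int.toNat_of_nonneg hv0).symm⟩
    have hn : n < 62 ^ 8 := by exact_mod_cast hv8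
    simp only [hx]
    rw [pvALoop_spec n []]
    simp only [List.nil_append]
    rw [show PySem.List.pyGet? pvAlphanum ((pvFin n : Nat) : Int) = some (pvCh (pvFin n)) from by
          rw [PySem.List.pyGet?_natCast]
          have hlen : pvFin n < pvAlphanum.length := by
            have hlt := pvFin_lt n
            have : pvAlphanum.length = 62 := rfl
            omega
          simp [List.getElem?_eq_getElem hlen, pvCh, List.getD]]
    simp only [PySem.List.slice?_none_none_neg_one]
    have key := pvA_digits n hn
    have hB : (PySem.List.pyRange 0 8 1).map (fun i =>
        PySem.List.pyGetD pvAlphanum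
          (PySem.Int.mod (PySem.Int.floordiv (n:Int) ((62:Int) ^ ((7:Int) - i).toNat)) 62) '0')
        = (pvMsb 8 n).map pvCh := by
      rw [pvMsb_eight, show PySem.List.pyRange 0 8 1 = [0,1,2,3,4,5,6,7] from by decide]
      simp only [List.map_cons, List.map_nil]
      rw [show ((7:Int)-0).toNat = 7 from by decide, show ((7:Int)-1).toNat = 6 from by decide,
          show ((7:Int)-2).toNat = 5 from by decide, show ((7:Int)-3).toNat = 4 from by decide,
          show ((7:Int)-4).toNat = 3 from by decide, show ((7:Int)-5).toNat = 2 from by decide,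
          show ((7:Int)-6).toNat = 1 from by decide, show ((7:Int)-7).toNat = 0 from by decide,
          pvB_elem n 7, pvB_elem n 6, pvB_elem n 5, pvB_elem n 4,
          pvB_elem n 3, pvB_elem n 2, pvB_elem n 1, pvB_elem n 0]
      simp [pow_one, Nat.div_one]
    rw [hB]
    by_cases hc : ((pvPref n).map pvCh ++ [pvCh (pvFin n)]).reverse.length < 8
    · rw [if_pos hc, ← key]
    · have hle := pvLen_le n hn
      have h8 : ((pvPref n).map pvCh ++ [pvCh (pvFin n)]).reverse.length = 8 := by
        simp at hc ⊢; simp at hle; omega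
      rw [if_neg hc, ← key, h8]
      simp
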